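-- pv_equiv track=rewrite | github.com/usedupnote/SolvedProblem_JavaPython | 프로그래머스/3/161988. 연속 펄스 부분 수열의 합/연속 펄스 부분 수열의 합.py | solution
-- ===== SOURCE A (Python) =====
-- def solution(sequence):
--     sign = [-1, 1]
--
--     current = 0
--     minimum = 0
--     maximum = 0
--
--     if len(sequence) == 1 :
--         return (-sequence[0] if sequence[0]<0 else sequence[0])
--
--     for i, num in enumerate(sequence):
--         current += num * sign[i%2]
--         if minimum > current :
--             minimum = current
--         if maximum < current :
--             maximum = current
--
--     return maximum - minimum
-- ===== SOURCE B (Python) =====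
-- def solution(sequence):
--     end_hi = end_lo = best = 0
--     s = -1
--     for num in sequence:
--         v = s * num
--         s = -s
--         end_hi = max(end_hi + v, 0)
--         end_lo = min(end_lo + v, 0)
--         best = max(best, end_hi, -end_lo)
--     return best
-- ===== Notes on version B (the rewrite author's own statement) =====
-- stated objective: alternative
-- what changed: Replaces the prefix-sum running-min/max scan (and its redundant len==1 special case) by a two-sided Kadane scan: it maintains the best alternating-sign subarray sum ending at the current position (and its mirror for the negated signs) and takes the overall best, using the fact that the answer equals the largest absolute contiguous signed-subarray sum.
import Mathlib
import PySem

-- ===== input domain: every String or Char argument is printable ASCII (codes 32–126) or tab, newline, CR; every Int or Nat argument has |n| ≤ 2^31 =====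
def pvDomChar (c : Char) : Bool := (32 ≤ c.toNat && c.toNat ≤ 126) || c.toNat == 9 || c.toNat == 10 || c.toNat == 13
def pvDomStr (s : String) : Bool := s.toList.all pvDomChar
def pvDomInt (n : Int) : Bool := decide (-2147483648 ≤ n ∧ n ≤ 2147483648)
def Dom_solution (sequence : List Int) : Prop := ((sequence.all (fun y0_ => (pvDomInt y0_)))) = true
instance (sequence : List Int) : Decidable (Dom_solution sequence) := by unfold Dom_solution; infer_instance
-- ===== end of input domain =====

-- B replaces A's prefix-sum running-min/max scan by a two-sided Kadane scan (best signed subarray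
-- sum ending here, and its mirror for negated signs); alternative algorithm, same cost.

-- ===== PORT A =====
def solution (sequence : List Int) : Int :=
  let sign : List Int := [-1, 1]
  if sequence.length == 1 then
    -- sequence[0]: in this branch length = 1, so pyGet? is some; getD 0 is never the default
    let s0 := (PySem.List.pyGet? sequence 0).getD 0
    if s0 < 0 then -s0 else s0
  else
    let st := (PySem.List.enumerate sequence 0).foldl
      (fun (st : Int × Int × Int) p =>
        let current := st.1 + p.2 * PySem.List.pyGetD sign (PySem.Int.mod p.1 2) 0
        let minimum := if st.2.1 > current then current else st.2.1
        let maximum := if st.2.2 < current then current else st.2.2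
        (current, minimum, maximum)) (0, 0, 0)
    st.2.2 - st.2.1

-- ===== PORT B =====
-- state (end_hi, end_lo, best, s), initial (0, 0, 0, -1), exactly Source B's loop
def solution_alt (sequence : List Int) : Int :=
  let st := sequence.foldl
    (fun (st : Int × Int × Int × Int) num =>
      let v := st.2.2.2 * num
      let s := -st.2.2.2
      let end_hi := max (st.1 + v) 0
      let end_lo := min (st.2.1 + v) 0
      let best := max st.2.2.1 (max end_hi (-end_lo))
      (end_hi, end_lo, best, s)) (0, 0, 0, -1)
  st.2.2.1

-- ===== PRECONDITION & SPEC =====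
def Spec_solution (sequence : List Int) (out : Int) : Prop := out = solution_alt sequence
instance (sequence : List Int) (out : Int) : Decidable (Spec_solution sequence out) := by unfold Spec_solution; infer_instance

-- ===== CLAIM (what is proved, stated in full; the proofs are below) =====
def Claim_equal_solution : Prop := ∀ (sequence : List Int), Dom_solution sequence → Spec_solution sequence (solution sequence)

-- ===== LEMMAS AND PROOFS =====

-- the alternating-sign sequence, starting with sign s
def altMap (s : Int) : List Int → List Int
  | [] => []
  | x :: xs => (s * x) :: altMap (-s) xs

-- the prefix sums of v starting from running total c
def prefixes (c : Int) : List Int → List Int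
  | [] => []
  | v :: vs => (c + v) :: prefixes (c + v) vs

-- the pure Kadane step on (end_hi, end_lo, best)
def kstep (st : Int × Int × Int) (x : Int) : Int × Int × Int :=
  let hi := max (st.1 + x) 0
  let lo := min (st.2.1 + x) 0
  (hi, lo, max st.2.2 (max hi (-lo)))

-- B's stateful fold projects to the pure Kadane fold over the alternating-sign list
theorem bfold_eq (xs : List Int) : ∀ (s hi lo best : Int),
    (xs.foldl
      (fun (st : Int × Int × Int × Int) num =>
        let v := st.2.2.2 * num
        let s := -st.2.2.2
        let end_hi := max (st.1 + v) 0
        let end_lo := min (st.2.1 + v) 0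
        let best := max st.2.2.1 (max end_hi (-end_lo))
        (end_hi, end_lo, best, s)) (hi, lo, best, s)).2.2.1
    = ((altMap s xs).foldl kstep (hi, lo, best)).2.2 := by
  induction xs with
  | nil => intro s hi lo best; simp [altMap]
  | cons x xs ih => intro s hi lo best; simp only [List.foldl_cons, altMap]; exact ih _ _ _ _

-- Kadane invariant: state (S - min prefix, S - max prefix, max prefix - min prefix)
theorem kfold_eq (v : List Int) : ∀ (c mn mx : Int), mn ≤ c → c ≤ mx →
    v.foldl kstep (c - mn, c - mx, mx - mn)
    = (c + v.sum - (prefixes c v).foldl min mn,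
       c + v.sum - (prefixes c v).foldl max mx,
       (prefixes c v).foldl max mx - (prefixes c v).foldl min mn) := by
  induction v with
  | nil => intro c mn mx _ _; simp [prefixes]
  | cons x xs ih =>
    intro c mn mx h1 h2
    simp only [List.foldl_cons, prefixes, List.sum_cons]
    have e : kstep (c - mn, c - mx, mx - mn) x
        = (c + x - min mn (c + x), c + x - max mx (c + x), max mx (c + x) - min mn (c + x)) := by
      simp only [kstep, Prod.mk.injEq]
      refine ⟨?_, ?_, ?_⟩ <;> · simp only [max_def, min_def]; split_ifs <;> omega
    rw [e]
    have := ih (c + x) (min mn (c + x)) (max mx (c + x)) (by omega) (by omega)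
    rw [this]
    have : c + x + xs.sum = c + (x + xs.sum) := by ring
    rw [this]

-- A's fold over the signed values computes (final sum, running min, running max) of the prefix sums
theorem foldS_eq (v : List Int) : ∀ (c mn mx : Int),
    v.foldl (fun (st : Int × Int × Int) x =>
      (st.1 + x,
       if st.2.1 > st.1 + x then st.1 + x else st.2.1,
       if st.2.2 < st.1 + x then st.1 + x else st.2.2)) (c, mn, mx)
    = (c + v.sum, (prefixes c v).foldl min mn, (prefixes c v).foldl max mx) := by
  induction v with
  | nil => intro c mn mx; simp [prefixes]
  | cons x xs ih =>
    intro c mn mx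
    simp only [List.foldl_cons, prefixes, List.sum_cons]
    rw [ih]
    simp only [Prod.mk.injEq]
    refine ⟨by ring, ?_, ?_⟩
    · congr 1; simp only [min_def]; split_ifs <;> omega
    · congr 1; simp only [max_def]; split_ifs <;> omega

-- A's per-step body, rewritten through the sign-table lookup
theorem stepA_eq (p : Int × Int) (st : Int × Int × Int) :
    (let current := st.1 + p.2 * PySem.List.pyGetD [(-1 : Int), 1] (PySem.Int.mod p.1 2) 0
     let minimum := if st.2.1 > current then current else st.2.1
     let maximum := if st.2.2 < current then current else st.2.2
     ((current, minimum, maximum) : Int × Int × Int))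
    = (let x := if PySem.Int.mod p.1 2 == 0 then -p.2 else p.2
       (st.1 + x,
        if st.2.1 > st.1 + x then st.1 + x else st.2.1,
        if st.2.2 < st.1 + x then st.1 + x else st.2.2)) := by
  have hm : PySem.Int.mod p.1 2 = 0 ∨ PySem.Int.mod p.1 2 = 1 := by
    simp only [PySem.Int.mod, Int.fmod_eq_emod]; omega
  have h0 : PySem.List.pyGetD [(-1 : Int), 1] 0 0 = -1 := by decide
  have h1 : PySem.List.pyGetD [(-1 : Int), 1] 1 0 = 1 := by decide
  rcases hm with h | h
  · rw [h]; norm_num [h0, mul_neg_one]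
  · rw [h]; norm_num [h1, mul_one]

-- the signed list A builds by index parity is the alternating map
theorem enumMap_eq_altMap (xs : List Int) : ∀ (k : Int),
    (PySem.List.enumerate xs k).map
      (fun p => if PySem.Int.mod p.1 2 == 0 then -p.2 else p.2)
    = altMap (if PySem.Int.mod k 2 == 0 then -1 else 1) xs := by
  induction xs with
  | nil => intro k; simp [PySem.List.enumerate_nil, altMap]
  | cons x xs ih =>
    intro k
    rw [PySem.List.enumerate_cons, List.map_cons, ih (k + 1), altMap]
    have hk : PySem.Int.mod k 2 = 0 ∨ PySem.Int.mod k 2 = 1 := by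
      simp only [PySem.Int.mod, Int.fmod_eq_emod]; omega
    have hk1 : PySem.Int.mod (k + 1) 2 = 0 ↔ PySem.Int.mod k 2 = 1 := by
      simp only [PySem.Int.mod, Int.fmod_eq_emod]; omega
    have hk1v : PySem.Int.mod (k + 1) 2 = 0 ∨ PySem.Int.mod (k + 1) 2 = 1 := by
      simp only [PySem.Int.mod, Int.fmod_eq_emod]; omega
    rcases hk with h | h
    · have h' : PySem.Int.mod (k + 1) 2 = 1 := by
        rcases hk1v with h'' | h''
        · exact absurd (hk1.mp h'') (by rw [h]; decide)
        · exact h''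
      simp only [h, h']
      norm_num
    · have h' : PySem.Int.mod (k + 1) 2 = 0 := hk1.mpr h
      simp only [h, h']
      norm_num

-- B's value, in prefix min/max form
theorem B_eq (sequence : List Int) :
    solution_alt sequence
    = (prefixes 0 (altMap (-1) sequence)).foldl max 0
      - (prefixes 0 (altMap (-1) sequence)).foldl min 0 := by
  simp only [solution_alt]
  rw [bfold_eq]
  have h0 : ((0 : Int), (0 : Int), (0 : Int)) = ((0 : Int) - 0, (0 : Int) - 0, (0 : Int) - 0) := by
    norm_num
  rw [h0, kfold_eq _ 0 0 0 le_rfl le_rfl]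

-- A's fold value, in prefix min/max form
theorem A_eq (sequence : List Int) :
    (let st := (PySem.List.enumerate sequence 0).foldl
      (fun (st : Int × Int × Int) p =>
        let current := st.1 + p.2 * PySem.List.pyGetD [(-1 : Int), 1] (PySem.Int.mod p.1 2) 0
        let minimum := if st.2.1 > current then current else st.2.1
        let maximum := if st.2.2 < current then current else st.2.2
        (current, minimum, maximum)) (0, 0, 0)
     st.2.2 - st.2.1)
    = (prefixes 0 (altMap (-1) sequence)).foldl max 0
      - (prefixes 0 (altMap (-1) sequence)).foldl min 0 := by
  have hcong : (PySem.List.enumerate sequence 0).foldl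
      (fun (st : Int × Int × Int) p =>
        let current := st.1 + p.2 * PySem.List.pyGetD [(-1 : Int), 1] (PySem.Int.mod p.1 2) 0
        let minimum := if st.2.1 > current then current else st.2.1
        let maximum := if st.2.2 < current then current else st.2.2
        (current, minimum, maximum)) (0, 0, 0)
      = (PySem.List.enumerate sequence 0).foldl
      (fun (st : Int × Int × Int) p =>
        let x := if PySem.Int.mod p.1 2 == 0 then -p.2 else p.2
        (st.1 + x,
         if st.2.1 > st.1 + x then st.1 + x else st.2.1,
         if st.2.2 < st.1 + x then st.1 + x else st.2.2)) (0, 0, 0) := by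
    apply PySem.List.foldl_congr_mem
    intro acc p _
    exact stepA_eq p acc
  simp only
  rw [hcong, ← List.foldl_map
    (f := fun (p : Int × Int) => if PySem.Int.mod p.1 2 == 0 then -p.2 else p.2)
    (g := fun (st : Int × Int × Int) x =>
      (st.1 + x,
       if st.2.1 > st.1 + x then st.1 + x else st.2.1,
       if st.2.2 < st.1 + x then st.1 + x else st.2.2))]
  have h0 : (if PySem.Int.mod (0 : Int) 2 == 0 then (-1 : Int) else 1) = -1 := by decide
  rw [enumMap_eq_altMap sequence 0, h0, foldS_eq]

-- ===== VERDICT (by name: the statement is the Claim_ definition above) =====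
theorem solution_spec : Claim_equal_solution := by
  intro sequence _
  unfold Spec_solution solution
  rw [B_eq]
  by_cases h1 : sequence.length = 1
  · match sequence, h1 with
    | [x], _ =>
      simp only [altMap, prefixes, List.foldl_cons, List.foldl_nil]
      simp [PySem.List.pyGet?, PySem.List.pyIdx?, max_def, min_def]
      split_ifs <;> omega
  · simp only [beq_iff_eq, h1, if_false]
    exact A_eq sequence
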